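-- pv_equiv track=rewrite | github.com/GarvenKaluluJr/Text-Encrypt-Decrypt-program | lab_cipher/program_a_encrypt_decrypt.py | build_keyed_alphabet
-- ===== SOURCE A (Python) =====
-- ALPHABET = "abcdefghijklmnopqrstuvwxyz"
--
-- def build_keyed_alphabet(keyword: str) -> str:
--     """
--     Build a keyed substitution alphabet based on the given keyword.
--     Duplicate letters are removed, and remaining alphabet letters
--     are appended in normal order.
--     """
--     # Keep only alphabetic characters from the keyword
--     kw = "".join(ch for ch in keyword.lower() if ch in ALPHABET)
--
--     seen = set()      # Set to track already used characters
--     unique = []       # List of unique characters in keyword order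
--
--     # Add unique characters from the keyword
--     for ch in kw:
--         if ch not in seen:
--             seen.add(ch)
--             unique.append(ch)
--
--     # Add remaining alphabet letters not present in the keyword
--     remaining = [ch for ch in ALPHABET if ch not in seen]
--
--     # Construct the final keyed alphabet
--     keyed = "".join(unique + remaining)
--
--     # Sanity check: keyed alphabet must contain exactly 26 letters
--     if len(keyed) != 26:
--         raise ValueError("Invalid keyed alphabet construction.")
--
--     return keyed
-- ===== SOURCE B (Python) =====
-- ALPHABET = "abcdefghijklmnopqrstuvwxyz"
--
-- def build_keyed_alphabet(keyword: str) -> str: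
--     # Rank-and-sort: every letter gets a numeric rank -- keyword letters get
--     # negative ranks ordered by first occurrence, the rest keep their
--     # alphabetical rank -- and the keyed alphabet is ALPHABET sorted by rank.
--     kw = "".join(ch for ch in keyword.lower() if ch in ALPHABET)
--
--     def rank(c):
--         return kw.index(c) - len(kw) if c in kw else ord(c) - 97
--
--     return "".join(sorted(ALPHABET, key=rank))
-- ===== Notes on version B (the rewrite author's own statement) =====
-- stated objective: alternative
-- what changed: Replaces A's dedup construction (seen-set loop over the keyword plus a second filtering pass over the alphabet, then a length check) with a rank-and-sort: each letter is assigned an integer rank (keyword letters a negative rank by first occurrence, others their alphabetical rank) and the 26-letter alphabet is sorted by that key.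
import Mathlib
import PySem

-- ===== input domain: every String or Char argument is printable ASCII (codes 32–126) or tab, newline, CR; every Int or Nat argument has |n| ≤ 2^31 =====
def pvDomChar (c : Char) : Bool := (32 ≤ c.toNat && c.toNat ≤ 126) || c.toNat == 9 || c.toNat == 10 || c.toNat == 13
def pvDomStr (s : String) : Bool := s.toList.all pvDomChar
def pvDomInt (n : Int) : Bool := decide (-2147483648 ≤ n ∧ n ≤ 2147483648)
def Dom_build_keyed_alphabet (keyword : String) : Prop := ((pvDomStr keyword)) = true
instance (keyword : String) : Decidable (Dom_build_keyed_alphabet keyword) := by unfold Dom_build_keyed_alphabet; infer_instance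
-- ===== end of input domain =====

-- B replaces A's dedup construction (seen-set loop over the keyword, a second
-- filtering pass over the alphabet, a dead length check) with a rank-and-sort:
-- each letter gets an integer rank and the alphabet is sorted by it (alternative
-- algorithm, similar cost).

-- ===== PORT A =====
def pvAlphabet : List Char := "abcdefghijklmnopqrstuvwxyz".toList

def build_keyed_alphabet (keyword : String) : String :=
  -- kw = "".join(ch for ch in keyword.lower() if ch in ALPHABET)
  let kw := (PySem.Chars.lower keyword.toList).filter (fun ch => pvAlphabet.contains ch)
  -- for ch in kw: if ch not in seen: seen.add(ch); unique.append(ch)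
  let su := kw.foldl
    (fun (st : PySem.Set Char × List Char) ch =>
      if PySem.Set.contains st.1 ch then st else (PySem.Set.add st.1 ch, st.2 ++ [ch]))
    (PySem.Set.empty, [])
  -- remaining = [ch for ch in ALPHABET if ch not in seen]
  let remaining := pvAlphabet.filter (fun ch => !PySem.Set.contains su.1 ch)
  let keyed := su.2 ++ remaining
  -- if len(keyed) != 26: raise ValueError(...)  — proven unreachable below
  if keyed.length ≠ 26 then "" else String.ofList keyed

-- ===== PORT B =====
-- rank(c) = kw.index(c) - len(kw) if c in kw else ord(c) - 97
def pvRank (kw : List Char) (c : Char) : Int :=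
  if kw.contains c then (((PySem.List.index? kw c).getD 0 : Nat) : Int) - kw.length
  else ((c.toNat : Int) - 97)

def build_keyed_alphabet_alt (keyword : String) : String :=
  let kw := (PySem.Chars.lower keyword.toList).filter (fun ch => pvAlphabet.contains ch)
  -- "".join(sorted(ALPHABET, key=rank))
  String.ofList (PySem.List.sorted pvAlphabet (pvRank kw))

-- ===== PRECONDITION & SPEC =====
def Spec_build_keyed_alphabet (keyword : String) (out : String) : Prop := out = build_keyed_alphabet_alt keyword
instance (keyword : String) (out : String) : Decidable (Spec_build_keyed_alphabet keyword out) := by unfold Spec_build_keyed_alphabet; infer_instance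

-- ===== CLAIM (what is proved, stated in full; the proofs are below) =====
def Claim_equal_build_keyed_alphabet : Prop := ∀ (keyword : String), Dom_build_keyed_alphabet keyword → Spec_build_keyed_alphabet keyword (build_keyed_alphabet keyword)

-- ===== LEMMAS AND PROOFS =====

-- A's loop keeps seen and unique in lockstep.
theorem pv_pair_fold (l : List Char) (s : List Char) :
    l.foldl (fun (st : PySem.Set Char × List Char) ch =>
        if PySem.Set.contains st.1 ch then st else (PySem.Set.add st.1 ch, st.2 ++ [ch]))
      (s, s)
    = (l.foldl PySem.Set.add s, l.foldl PySem.Set.add s) := by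
  induction l generalizing s with
  | nil => rfl
  | cons ch l ih =>
      by_cases h : ch ∈ s
      · simpa [PySem.Set.add, PySem.Set.contains, h] using ih s
      · simpa [PySem.Set.add, PySem.Set.contains, h] using ih (s ++ [ch])

theorem pv_pair_fold0 (l : List Char) :
    l.foldl (fun (st : PySem.Set Char × List Char) ch =>
        if PySem.Set.contains st.1 ch then st else (PySem.Set.add st.1 ch, st.2 ++ [ch]))
      (PySem.Set.empty, [])
    = (l.foldl PySem.Set.add PySem.Set.empty, l.foldl PySem.Set.add PySem.Set.empty) :=
  pv_pair_fold l []

-- Folding Set.add of a duplicate-free list onto an accumulator appends exactly the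
-- elements not already present.
theorem pv_fold_add_nodup (ys : List Char) (hnd : ys.Nodup) (acc : List Char) :
    ys.foldl PySem.Set.add acc = acc ++ ys.filter (fun y => !PySem.Set.contains acc y) := by
  induction ys generalizing acc with
  | nil => simp
  | cons y ys ih =>
      have hy : y ∉ ys := (List.nodup_cons.mp hnd).1
      have hnd' : ys.Nodup := (List.nodup_cons.mp hnd).2
      by_cases h : y ∈ acc
      · simpa [PySem.Set.add, PySem.Set.contains, List.filter_cons, h] using ih hnd' acc
      · have hfeq : ys.filter (fun z => !PySem.Set.contains (acc ++ [y]) z)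
            = ys.filter (fun z => !PySem.Set.contains acc z) := by
          apply List.filter_congr
          intro z hz
          have hzy : z ≠ y := fun e => hy (e ▸ hz)
          simp [PySem.Set.contains, hzy]
        have hstep := ih hnd' (acc ++ [y])
        rw [hfeq] at hstep
        simpa [PySem.Set.add, PySem.Set.contains, List.filter_cons, h] using hstep

theorem pv_alphabet_nodup : pvAlphabet.Nodup := by decide

-- A's result, as a list, is the ordered dedup of kw ++ alphabet.
theorem pv_keyed_eq (kw : List Char) :
    (kw.foldl PySem.Set.add PySem.Set.empty)
      ++ pvAlphabet.filter (fun ch => !PySem.Set.contains (kw.foldl PySem.Set.add PySem.Set.empty) ch)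
    = PySem.List.dedup (kw ++ pvAlphabet) := by
  have h1 : PySem.List.dedup (kw ++ pvAlphabet)
      = pvAlphabet.foldl PySem.Set.add (kw.foldl PySem.Set.add PySem.Set.empty) := by
    simp [PySem.List.dedup_eq_ofList, PySem.Set.ofList_eq_foldl, List.foldl_append]
  rw [h1, pv_fold_add_nodup pvAlphabet pv_alphabet_nodup]

-- the dedup of kw ++ alphabet is a permutation of the alphabet when kw ⊆ alphabet
theorem pv_dedup_perm (kw : List Char) (hkw : ∀ c ∈ kw, c ∈ pvAlphabet) :
    List.Perm (PySem.List.dedup (kw ++ pvAlphabet)) pvAlphabet := by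
  rw [List.perm_ext_iff_of_nodup (PySem.List.nodup_dedup _) pv_alphabet_nodup]
  intro a
  rw [PySem.List.mem_dedup, List.mem_append]
  constructor
  · rintro (h | h)
    · exact hkw a h
    · exact h
  · exact Or.inr

theorem pv_keyed_length (kw : List Char) (hkw : ∀ c ∈ kw, c ∈ pvAlphabet) :
    (PySem.List.dedup (kw ++ pvAlphabet)).length = 26 := by
  rw [(pv_dedup_perm kw hkw).length_eq]; decide

-- idxOf? equals some idxOf on members
theorem pv_idxOf?_eq (v : Char) (l : List Char) (h : v ∈ l) :
    List.idxOf? v l = some (List.idxOf v l) := by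
  induction l with
  | nil => simp at h
  | cons x t ih =>
    by_cases hx : x = v
    · simp [List.idxOf?_cons, hx]
    · have hv : v ∈ t := (List.mem_cons.mp h).resolve_left (fun e => hx e.symm)
      simp [List.idxOf?_cons, hx, ih hv]

-- Folding Set.add onto acc splits as acc ++ (fresh fold, filtered by acc)
theorem pv_fold_add_split (xs : List Char) (acc : List Char) :
    xs.foldl PySem.Set.add acc
      = acc ++ (xs.foldl PySem.Set.add ([] : PySem.Set Char)).filter
          (fun y => !PySem.Set.contains acc y) := by
  induction xs generalizing acc with
  | nil => simp
  | cons x xs ih =>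
    have hx0 : PySem.Set.add ([] : PySem.Set Char) x = [x] := by
      simp [PySem.Set.add, PySem.Set.contains]
    rw [List.foldl_cons, List.foldl_cons, hx0, ih [x]]
    by_cases h : x ∈ acc
    · have hadd : PySem.Set.add acc x = acc := by
        simp [PySem.Set.add, PySem.Set.contains, h]
      rw [hadd, ih acc]
      rw [List.filter_append, List.filter_filter]
      have h1 : ([x] : List Char).filter (fun y => !PySem.Set.contains acc y) = [] := by
        simp [PySem.Set.contains, h]
      have h2 : (xs.foldl PySem.Set.add ([] : PySem.Set Char)).filter
            (fun y => (!PySem.Set.contains acc y) && !PySem.Set.contains ([x] : List Char) y)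
          = (xs.foldl PySem.Set.add ([] : PySem.Set Char)).filter
              (fun y => !PySem.Set.contains acc y) := by
        apply List.filter_congr
        intro z _
        by_cases hz : z ∈ acc
        · simp [PySem.Set.contains, hz]
        · have hzx : z ≠ x := fun e => hz (e ▸ h)
          simp [PySem.Set.contains, hz, hzx]
      rw [h1, h2]
      simp
    · have hadd : PySem.Set.add acc x = acc ++ [x] := by
        simp [PySem.Set.add, PySem.Set.contains, h]
      rw [hadd, ih (acc ++ [x])]
      rw [List.filter_append, List.filter_filter]
      have h1 : ([x] : List Char).filter (fun y => !PySem.Set.contains acc y) = [x] := by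
        simp [PySem.Set.contains, h]
      have h2 : (xs.foldl PySem.Set.add ([] : PySem.Set Char)).filter
            (fun y => (!PySem.Set.contains acc y) && !PySem.Set.contains ([x] : List Char) y)
          = (xs.foldl PySem.Set.add ([] : PySem.Set Char)).filter
              (fun y => !PySem.Set.contains (acc ++ [x]) y) := by
        apply List.filter_congr
        intro z _
        by_cases hz : z = x
        · simp [PySem.Set.contains, hz]
        · simp [PySem.Set.contains, hz]
      rw [h1, h2]
      rw [List.append_assoc]

-- ordered dedup, one step
theorem pv_dedup_cons (x : Char) (xs : List Char) :
    PySem.List.dedup (x :: xs)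
      = x :: (PySem.List.dedup xs).filter (fun y => !PySem.Set.contains ([x] : List Char) y) := by
  have h0 : PySem.Set.add ([] : PySem.Set Char) x = [x] := by
    simp [PySem.Set.add, PySem.Set.contains]
  simp only [PySem.List.dedup_eq_ofList, PySem.Set.ofList_eq_foldl, List.foldl_cons, h0]
  rw [pv_fold_add_split xs [x]]
  rfl

-- the ordered dedup lists first occurrences in increasing index order
theorem pv_dedup_pairwise (xs : List Char) :
    (PySem.List.dedup xs).Pairwise (fun a b => xs.idxOf a < xs.idxOf b) := by
  induction xs with
  | nil => simp [PySem.List.dedup, PySem.Set.ofList, PySem.Set.empty]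
  | cons x xs ih =>
    rw [pv_dedup_cons]
    constructor
    · intro b hb
      have hbx : b ≠ x := by
        have := (List.mem_filter.mp hb).2
        simp [PySem.Set.contains] at this
        exact fun e => (by simp [e] at this)
      have h0 : List.idxOf x (x :: xs) = 0 := by simp
      have h1 : List.idxOf b (x :: xs) = List.idxOf b xs + 1 := by
        simp [Ne.symm hbx]
      omega
    · have hf := ih.filter (fun y => !PySem.Set.contains ([x] : List Char) y)
      apply hf.imp_of_mem
      intro a b ha hb hab
      have hax : a ≠ x := by
        have := (List.mem_filter.mp ha).2
        simp [PySem.Set.contains] at this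
        exact fun e => (by simp [e] at this)
      have hbx : b ≠ x := by
        have := (List.mem_filter.mp hb).2
        simp [PySem.Set.contains] at this
        exact fun e => (by simp [e] at this)
      have h1 : List.idxOf a (x :: xs) = List.idxOf a xs + 1 := by
        simp [Ne.symm hax]
      have h2 : List.idxOf b (x :: xs) = List.idxOf b xs + 1 := by
        simp [Ne.symm hbx]
      omega

-- alphabet facts
set_option maxRecDepth 8000 in
theorem pv_alpha_idx_bool : pvAlphabet.all (fun c => pvAlphabet.idxOf c + 97 == c.toNat) = true := by decide

theorem pv_alpha_idx : ∀ c ∈ pvAlphabet, pvAlphabet.idxOf c + 97 = c.toNat := by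
  intro c hc
  have := List.all_eq_true.mp pv_alpha_idx_bool c hc
  simpa using this

set_option maxRecDepth 8000 in
theorem pv_alpha_bounds_bool : pvAlphabet.all (fun c => 97 ≤ c.toNat && c.toNat ≤ 122) = true := by decide

theorem pv_alpha_bounds : ∀ c ∈ pvAlphabet, 97 ≤ c.toNat ∧ c.toNat ≤ 122 := by
  intro c hc
  have := List.all_eq_true.mp pv_alpha_bounds_bool c hc
  simpa using this

-- rank of a keyword letter, via index?
theorem pv_rank_mem (kw : List Char) (c : Char) (h : c ∈ kw) :
    pvRank kw c = (List.idxOf c kw : Int) - kw.length := by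
  have hc : kw.contains c = true := by simpa using h
  unfold pvRank
  rw [if_pos hc, PySem.List.index?_eq_idxOf?, pv_idxOf?_eq c kw h]
  rfl

theorem pv_rank_not_mem (kw : List Char) (c : Char) (h : c ∉ kw) :
    pvRank kw c = (c.toNat : Int) - 97 := by
  have hc : ¬ (kw.contains c = true) := by simpa using h
  unfold pvRank
  rw [if_neg hc]

-- dedup (kw ++ alphabet) is arranged in strictly increasing rank
theorem pv_rank_pairwise (kw : List Char) (hkw : ∀ c ∈ kw, c ∈ pvAlphabet) :
    (PySem.List.dedup (kw ++ pvAlphabet)).Pairwise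
      (fun a b => pvRank kw a < pvRank kw b) := by
  apply (pv_dedup_pairwise (kw ++ pvAlphabet)).imp_of_mem
  intro a b ha hb hab
  have ha' : a ∈ kw ++ pvAlphabet := by
    rw [PySem.List.mem_dedup] at ha; exact ha
  have hb' : b ∈ kw ++ pvAlphabet := by
    rw [PySem.List.mem_dedup] at hb; exact hb
  have hamem : a ∈ pvAlphabet := by
    rcases List.mem_append.mp ha' with h | h
    · exact hkw a h
    · exact h
  have hbmem : b ∈ pvAlphabet := by
    rcases List.mem_append.mp hb' with h | h
    · exact hkw b h
    · exact h
  rw [List.idxOf_append, List.idxOf_append] at hab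
  by_cases haK : a ∈ kw <;> by_cases hbK : b ∈ kw
  · -- both in the keyword: first-occurrence order
    rw [if_pos haK, if_pos hbK] at hab
    rw [pv_rank_mem kw a haK, pv_rank_mem kw b hbK]
    omega
  · -- a in keyword, b not: negative rank < nonnegative rank
    have hlt : List.idxOf a kw < kw.length := List.idxOf_lt_length_of_mem haK
    have hge : 97 ≤ b.toNat := (pv_alpha_bounds b hbmem).1
    rw [pv_rank_mem kw a haK, pv_rank_not_mem kw b hbK]
    omega
  · -- a not in keyword, b in keyword: contradicts the index order
    rw [if_neg haK, if_pos hbK] at hab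
    have hlt : List.idxOf b kw < kw.length := List.idxOf_lt_length_of_mem hbK
    omega
  · -- neither in the keyword: alphabetical order
    rw [if_neg haK, if_neg hbK] at hab
    rw [pv_rank_not_mem kw a haK, pv_rank_not_mem kw b hbK]
    have h1 := pv_alpha_idx a hamem
    have h2 := pv_alpha_idx b hbmem
    omega

-- ===== VERDICT (by name: the statement is the Claim_ definition above) =====
theorem build_keyed_alphabet_spec : Claim_equal_build_keyed_alphabet := by
  intro keyword _
  unfold Spec_build_keyed_alphabet build_keyed_alphabet build_keyed_alphabet_alt
  simp only []
  set kw := (PySem.Chars.lower keyword.toList).filter (fun ch => pvAlphabet.contains ch) with hkwdef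
  have hmem : ∀ c ∈ kw, c ∈ pvAlphabet := by
    intro c hc
    rw [hkwdef] at hc
    simpa using (List.of_mem_filter hc)
  rw [pv_pair_fold0 kw]
  rw [pv_keyed_eq kw]
  rw [if_neg (by rw [pv_keyed_length kw hmem]; decide)]
  rw [PySem.List.sorted_eq_of_perm_of_pairwise_lt pvAlphabet
        (PySem.List.dedup (kw ++ pvAlphabet)) (pvRank kw)
        (pv_dedup_perm kw hmem) (pv_rank_pairwise kw hmem)]
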